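-- pv_equiv track=rewrite | github.com/Brant-B/subTeX | test.py | markdown_parser
-- ===== SOURCE A (Python) =====
-- TITLE = 'title'
--
-- HEADING = 'heading'
--
-- PARAGRAPH = 'paragraph'
--
-- def markdown_parser(text):
--     actions = []
--     in_paragraph = False
--     paragraph_text = ''
--     lines = text.split('\n')
--     for line in lines:
--         if line.startswith('# '):
--             # 解析标题
--             title = line[2:]
--             if in_paragraph:
--                 actions.append((PARAGRAPH, paragraph_text))
--                 in_paragraph = False
--                 paragraph_text = ''
--             actions.append((TITLE, title))
--         elif line.startswith('## '):
--             # 解析二级标题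
--             heading = line[3:]
--             if in_paragraph:
--                 actions.append((PARAGRAPH, paragraph_text))
--                 in_paragraph = False
--                 paragraph_text = ''
--             actions.append((HEADING, heading))
--         elif line.strip() == '':
--             # 处理空行
--             if in_paragraph:
--                 # actions.append((PARAGRAPH, paragraph_text))
--                 in_paragraph = False
--                 paragraph_text = ''
--         else:
--             # 处理段落
--             if not in_paragraph:
--                 in_paragraph = True
--                 paragraph_text = line
--             else:
--                 paragraph_text += ' ' + line
--     if in_paragraph:
--         actions.append((PARAGRAPH, paragraph_text))
--     return actions
-- ===== SOURCE B (Python) =====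
-- TITLE = 'title'
--
-- HEADING = 'heading'
--
-- PARAGRAPH = 'paragraph'
--
--
-- def _classify(line):
--     """Map a line to a token: a (kind, payload) pair, or None for a blank line."""
--     if line.startswith('# '):
--         return (TITLE, line[2:])
--     if line.startswith('## '):
--         return (HEADING, line[3:])
--     if line.strip() == '':
--         return None
--     return ('para', line)
--
--
-- def markdown_parser(text):
--     # pass 1: classify every line into a token
--     tokens = [_classify(line) for line in text.split('\n')]
--     # pass 2: fold over tokens keeping a paragraph buffer (list of lines)
--     actions = []
--     buf = []
--     for tok in tokens:
--         if tok is None: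
--             buf = []          # blank line: drop the open paragraph (A never emits it)
--         elif tok[0] == 'para':
--             buf.append(tok[1])
--         else:
--             if buf:
--                 actions.append((PARAGRAPH, ' '.join(buf)))
--                 buf = []
--             actions.append(tok)
--     if buf:
--         actions.append((PARAGRAPH, ' '.join(buf)))
--     return actions
-- ===== Notes on version B (the rewrite author's own statement) =====
-- stated objective: alternative
-- what changed: Replaces A's single loop over boolean/string accumulator state with a two-pass design: a classification pass mapping each line to a token, then a fold over tokens that keeps the open paragraph as a list of lines, joined with single spaces only at emission.
import Mathlib
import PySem

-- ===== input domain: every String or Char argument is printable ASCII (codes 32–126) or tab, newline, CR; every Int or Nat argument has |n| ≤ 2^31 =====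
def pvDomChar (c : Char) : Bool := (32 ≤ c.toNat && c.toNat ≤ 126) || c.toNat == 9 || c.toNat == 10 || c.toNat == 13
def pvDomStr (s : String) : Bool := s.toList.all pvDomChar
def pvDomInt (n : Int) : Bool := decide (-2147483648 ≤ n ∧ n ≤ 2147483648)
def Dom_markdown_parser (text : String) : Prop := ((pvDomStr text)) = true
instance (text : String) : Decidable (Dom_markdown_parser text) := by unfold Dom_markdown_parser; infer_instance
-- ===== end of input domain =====

-- B restructures A's one-loop boolean/string accumulator into a classify pass plus a fold
-- over tokens keeping the open paragraph as a list of lines joined only on emission;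
-- same cost, proved to return the same value on every input.

-- ===== PORT A =====
-- one iteration of A's for-loop; state = (actions, in_paragraph, paragraph_text)
def mdStepA (st : List (String × String) × Bool × String) (line : String) :
    List (String × String) × Bool × String :=
  let (actions, in_p, ptxt) := st
  if PySem.Str.startswith line "# " then
    let title := PySem.Str.slice line (some 2) none
    let (actions, in_p, ptxt) :=
      if in_p then (actions ++ [("paragraph", ptxt)], false, "") else (actions, in_p, ptxt)
    (actions ++ [("title", title)], in_p, ptxt)
  else if PySem.Str.startswith line "## " then
    let heading := PySem.Str.slice line (some 3) none
    let (actions, in_p, ptxt) :=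
      if in_p then (actions ++ [("paragraph", ptxt)], false, "") else (actions, in_p, ptxt)
    (actions ++ [("heading", heading)], in_p, ptxt)
  else if PySem.Str.strip line == "" then
    if in_p then (actions, false, "") else (actions, in_p, ptxt)
  else
    if !in_p then (actions, true, line) else (actions, in_p, ptxt ++ " " ++ line)

def markdown_parser (text : String) : List (String × String) :=
  -- text.split('\n'): separator is non-empty so split? is always `some`
  let lines := (PySem.Str.split? text "\n").getD []
  let (actions, in_p, ptxt) := lines.foldl mdStepA ([], false, "")
  if in_p then actions ++ [("paragraph", ptxt)] else actions

-- ===== PORT B =====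
-- pass 1: classify a line into a token (none = blank line)
def mdClassify (line : String) : Option (String × String) :=
  if PySem.Str.startswith line "# " then some ("title", PySem.Str.slice line (some 2) none)
  else if PySem.Str.startswith line "## " then some ("heading", PySem.Str.slice line (some 3) none)
  else if PySem.Str.strip line == "" then none
  else some ("para", line)

-- pass 2: one fold step; state = (actions, paragraph buffer of lines)
def mdStepB (st : List (String × String) × List String) (tok : Option (String × String)) :
    List (String × String) × List String :=
  match tok with
  | none => (st.1, [])
  | some (tag, s) =>
    if tag == "para" then (st.1, st.2 ++ [s])
    else
      let actions := if st.2.isEmpty then st.1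
                     else st.1 ++ [("paragraph", PySem.Str.join " " st.2)]
      (actions ++ [(tag, s)], [])

def markdown_parser_alt (text : String) : List (String × String) :=
  let tokens := ((PySem.Str.split? text "\n").getD []).map mdClassify
  let (actions, buf) := tokens.foldl mdStepB ([], [])
  if buf.isEmpty then actions else actions ++ [("paragraph", PySem.Str.join " " buf)]

-- ===== PRECONDITION & SPEC =====
def Spec_markdown_parser (text : String) (out : List (String × String)) : Prop := out = markdown_parser_alt text
instance (text : String) (out : List (String × String)) : Decidable (Spec_markdown_parser text out) := by unfold Spec_markdown_parser; infer_instance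

-- ===== CLAIM (what is proved, stated in full; the proofs are below) =====
def Claim_equal_markdown_parser : Prop := ∀ (text : String), Dom_markdown_parser text → Spec_markdown_parser text (markdown_parser text)

-- ===== LEMMAS AND PROOFS =====

-- B's state viewed as A's state
def mdConv (st : List (String × String) × List String) : List (String × String) × Bool × String :=
  (st.1, !st.2.isEmpty, PySem.Str.join " " st.2)

theorem md_join_nil : PySem.Str.join " " [] = "" := by decide

theorem md_join_singleton (l : String) : PySem.Str.join " " [l] = l := by
  apply String.toList_inj.mp
  simp [PySem.Str.toList_join, PySem.Chars.join_singleton]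

theorem md_chars_join_append (sep : List Char) (bs : List (List Char)) (l : List Char)
    (h : bs ≠ []) :
    PySem.Chars.join sep (bs ++ [l]) = PySem.Chars.join sep bs ++ sep ++ l := by
  induction bs with
  | nil => exact absurd rfl h
  | cons b bs ih =>
    cases bs with
    | nil =>
      rw [List.singleton_append, PySem.Chars.join_cons_cons, PySem.Chars.join_singleton,
        PySem.Chars.join_singleton]
    | cons b' bs' =>
      have ihh := ih (List.cons_ne_nil _ _)
      simp only [List.cons_append] at ihh ⊢
      rw [PySem.Chars.join_cons_cons, PySem.Chars.join_cons_cons, ihh]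
      simp [List.append_assoc]

theorem md_join_append (bs : List String) (l : String) (h : bs ≠ []) :
    PySem.Str.join " " (bs ++ [l]) = PySem.Str.join " " bs ++ " " ++ l := by
  apply String.toList_inj.mp
  have := md_chars_join_append (" ".toList) (bs.map String.toList) l.toList
    (by simpa using h)
  simpa [PySem.Str.toList_join] using this

theorem md_step_eq (st : List (String × String) × List String) (line : String) :
    mdStepA (mdConv st) line = mdConv (mdStepB st (mdClassify line)) := by
  obtain ⟨acts, buf⟩ := st
  cases buf with
  | nil =>
    unfold mdClassify mdStepA mdStepB mdConv
    split_ifs <;> simp_all [md_join_nil, md_join_singleton]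
  | cons b bs =>
    unfold mdClassify mdStepA mdStepB mdConv
    have hj : PySem.Str.join " " (b :: (bs ++ [line]))
        = PySem.Str.join " " (b :: bs) ++ " " ++ line := by
      simpa using md_join_append (b :: bs) line (by simp)
    split_ifs <;> simp_all [md_join_nil]

theorem md_loop_eq (lines : List String) (st : List (String × String) × List String) :
    lines.foldl mdStepA (mdConv st) = mdConv ((lines.map mdClassify).foldl mdStepB st) := by
  induction lines generalizing st with
  | nil => rfl
  | cons l ls ih =>
    simp only [List.foldl_cons, List.map_cons, md_step_eq st l]
    exact ih _

theorem md_main (lines : List String) :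
    (let (actions, in_p, ptxt) := lines.foldl mdStepA ([], false, "")
     if in_p then actions ++ [("paragraph", ptxt)] else actions)
    = (let (actions, buf) := (lines.map mdClassify).foldl mdStepB ([], [])
       if buf.isEmpty then actions
       else actions ++ [("paragraph", PySem.Str.join " " buf)]) := by
  have h0 : (([], false, "") : List (String × String) × Bool × String) = mdConv ([], []) := by
    simp [mdConv, md_join_nil]
  rw [h0, md_loop_eq]
  rcases (lines.map mdClassify).foldl mdStepB ([], []) with ⟨acts, buf⟩
  cases buf <;> simp [mdConv, md_join_nil]

-- ===== VERDICT (by name: the statement is the Claim_ definition above) =====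
theorem markdown_parser_spec : Claim_equal_markdown_parser := by
  intro text _
  exact md_main ((PySem.Str.split? text "\n").getD [])
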